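-- pv_equiv track=rewrite | github.com/oinattan/linguagens-formais-automatos | Unidade1/S3/Hierarquia-de-Chomsky/src/exercises.py | dfa_even_a
-- ===== SOURCE A (Python) =====
-- def dfa_even_a(s: str) -> bool:
--     """DFA que aceita cadeias sobre {a,b} onde o número de 'a' é par.
--
--     Estados: q0 (par), q1 (impar)
--     q0 é inicial e final.
--     Transitions: ao ler 'a' alterna q0<->q1; ao ler 'b' fica no mesmo estado.
--     """
--     state = 'q0'
--     for ch in s:
--         if ch == 'a':
--             state = 'q1' if state == 'q0' else 'q0'
--         elif ch == 'b':
--             pass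
--         else:
--             # símbolo fora do alfabeto -> rejeitar
--             return False
--     return state == 'q0'
-- ===== SOURCE B (Python) =====
-- def dfa_even_a(s: str) -> bool:
--     """Validate-then-count: the string is accepted iff every symbol is in
--     the alphabet {a,b} and the number of 'a' is even."""
--     return all(ch in 'ab' for ch in s) and sum(ch == 'a' for ch in s) % 2 == 0
-- ===== Notes on version B (the rewrite author's own statement) =====
-- stated objective: simpler
-- what changed: Replaced the explicit two-state machine with an early-return loop by a validate-then-count decomposition: one alphabet-membership pass and a parity test on the counted occurrences of the toggling symbol.
import Mathlib
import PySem

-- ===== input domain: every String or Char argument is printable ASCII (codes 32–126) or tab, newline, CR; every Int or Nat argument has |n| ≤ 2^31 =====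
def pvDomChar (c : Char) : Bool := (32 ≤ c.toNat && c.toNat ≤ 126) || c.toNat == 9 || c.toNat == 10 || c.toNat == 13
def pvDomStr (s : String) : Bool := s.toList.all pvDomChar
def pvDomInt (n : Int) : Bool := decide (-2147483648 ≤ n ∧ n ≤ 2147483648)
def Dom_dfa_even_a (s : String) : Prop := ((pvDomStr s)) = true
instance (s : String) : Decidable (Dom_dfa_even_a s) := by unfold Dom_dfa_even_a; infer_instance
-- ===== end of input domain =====

-- B replaces A's two-state machine loop by an alphabet-membership check plus an 'a'-count parity check (simpler decomposition).

-- ===== PORT A =====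
-- A's for-loop with early return: structural recursion over the characters, carrying the state string.
def dfaEvenALoop (state : String) : List Char → Bool
  | [] => state == "q0"
  | ch :: rest =>
    if ch == 'a' then dfaEvenALoop (if state == "q0" then "q1" else "q0") rest
    else if ch == 'b' then dfaEvenALoop state rest
    else false

def dfa_even_a (s : String) : Bool := dfaEvenALoop "q0" s.toList

-- ===== PORT B =====
def dfa_even_a_alt (s : String) : Bool :=
  (s.toList.all fun ch => ch == 'a' || ch == 'b') &&
  (PySem.Int.mod ((s.toList.map fun ch => if ch == 'a' then (1 : Int) else 0).sum) 2 == 0)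

-- ===== PRECONDITION & SPEC =====
def Spec_dfa_even_a (s : String) (out : Bool) : Prop := out = dfa_even_a_alt s
instance (s : String) (out : Bool) : Decidable (Spec_dfa_even_a s out) := by unfold Spec_dfa_even_a; infer_instance

-- ===== CLAIM (what is proved, stated in full; the proofs are below) =====
def Claim_equal_dfa_even_a : Prop := ∀ (s : String), Dom_dfa_even_a s → Spec_dfa_even_a s (dfa_even_a s)

-- ===== LEMMAS AND PROOFS =====
lemma pvParity0 (x : Int) : (Int.fmod (1 + x) 2 == (0 : Int)) = (Int.fmod x 2 == (1 : Int)) := by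
  have hf : ∀ a : Int, Int.fmod a 2 = a % 2 := fun a => by rw [Int.fmod_eq_emod]; simp
  rw [hf, hf]
  rcases Int.emod_two_eq x with h | h
  · have h2 : (1 + x) % 2 = 1 := by omega
    simp [h, h2]
  · have h2 : (1 + x) % 2 = 0 := by omega
    simp [h, h2]

lemma pvParity1 (x : Int) : (Int.fmod (1 + x) 2 == (1 : Int)) = (Int.fmod x 2 == (0 : Int)) := by
  have hf : ∀ a : Int, Int.fmod a 2 = a % 2 := fun a => by rw [Int.fmod_eq_emod]; simp
  rw [hf, hf]
  rcases Int.emod_two_eq x with h | h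
  · have h2 : (1 + x) % 2 = 1 := by omega
    simp [h, h2]
  · have h2 : (1 + x) % 2 = 0 := by omega
    simp [h, h2]

lemma dfaEvenALoop_eq (cs : List Char) :
    (dfaEvenALoop "q0" cs =
      ((cs.all fun ch => ch == 'a' || ch == 'b') &&
        (PySem.Int.mod ((cs.map fun ch => if ch == 'a' then (1 : Int) else 0).sum) 2 == 0))) ∧
    (dfaEvenALoop "q1" cs =
      ((cs.all fun ch => ch == 'a' || ch == 'b') &&
        (PySem.Int.mod ((cs.map fun ch => if ch == 'a' then (1 : Int) else 0).sum) 2 == 1))) := by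
  induction cs with
  | nil => simp [dfaEvenALoop, PySem.Int.mod]
  | cons c rest ih =>
    obtain ⟨ih0, ih1⟩ := ih
    by_cases ha : c = 'a'
    · subst ha
      constructor
      · have e : dfaEvenALoop "q0" ('a' :: rest) = dfaEvenALoop "q1" rest := rfl
        rw [e, ih1]
        cases hall : (rest.all fun ch => ch == 'a' || ch == 'b') <;>
          simp [hall, PySem.Int.mod, pvParity0]
      · have e : dfaEvenALoop "q1" ('a' :: rest) = dfaEvenALoop "q0" rest := rfl
        rw [e, ih0]
        cases hall : (rest.all fun ch => ch == 'a' || ch == 'b') <;>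
          simp [hall, PySem.Int.mod, pvParity1]
    · by_cases hb : c = 'b'
      · subst hb
        constructor
        · have e : dfaEvenALoop "q0" ('b' :: rest) = dfaEvenALoop "q0" rest := rfl
          rw [e, ih0]; simp
        · have e : dfaEvenALoop "q1" ('b' :: rest) = dfaEvenALoop "q1" rest := rfl
          rw [e, ih1]; simp
      · simp [dfaEvenALoop, ha, hb]

-- ===== VERDICT (by name: the statement is the Claim_ definition above) =====
theorem dfa_even_a_spec : Claim_equal_dfa_even_a := by
  intro s _
  unfold Spec_dfa_even_a dfa_even_a dfa_even_a_alt
  exact (dfaEvenALoop_eq s.toList).1
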